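-- pv_equiv track=rewrite | github.com/gyuminv2/codetree-TILs | 250408/고대 문명 유적 탐사/ancient-ruin-exploration.py | count_clear
-- ===== SOURCE A (Python) =====
-- from collections import deque
--
-- def bfs(arr, v, i, j, flg):
--     sset = set()
--     q = deque([(i, j)])
--     v[i][j] = 1
--     sset.add((i, j))
--     cnt = 1
--
--     while q:
--         i, j = q.popleft()
--         for di, dj in zip(dis, djs):
--             ni, nj = i + di, j + dj
--             if 0<=ni<5 and 0<=nj<5 and v[ni][nj] == 0 and arr[i][j] == arr[ni][nj]:
--                 v[ni][nj] = 1
--                 cnt += 1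
--                 q.append((ni, nj))
--                 sset.add((ni, nj))
--
--     if cnt >= 3:
--         if flg == 1:
--             for x, y in sset:
--                 arr[x][y] = 0
--         return cnt
--     else:
--         return 0
--
-- def count_clear(arr, flg):          # flg == 1일 때 3개 이상 값을 0으로 clear
--     v = [[0]*5 for _ in range(5)]
--     cnt = 0
--     for i in range(5):
--         for j in range(5):
--             if v[i][j] == 0:
--                 cnt += bfs(arr, v, i, j, flg)
--     return cnt
--
-- dis = [-1, 1, 0, 0]
--
-- djs = [0, 0, -1, 1]
-- ===== SOURCE B (Python) =====
-- # Alternative algorithm: per-cell bounded fixpoint closure instead of BFS with a visited matrix.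
-- # Like A, mutates arr in place when flg == 1 (same cells cleared); equivalence proved on the return value.
-- def count_clear(arr, flg):
--     def comp(i, j):
--         cells = {(i, j)}
--         for _ in range(25):
--             cells = cells | {(x + dx, y + dy)
--                              for (x, y) in cells
--                              for (dx, dy) in ((-1, 0), (1, 0), (0, -1), (0, 1))
--                              if 0 <= x + dx < 5 and 0 <= y + dy < 5
--                              and arr[x + dx][y + dy] == arr[x][y]}
--         return cells
--     big = [(i, j) for i in range(5) for j in range(5) if len(comp(i, j)) >= 3]
--     if flg == 1:
--         for (i, j) in big:
--             arr[i][j] = 0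
--     return len(big)
-- ===== Notes on version B (the rewrite author's own statement) =====
-- stated objective: alternative
-- what changed: Replaced the visited-matrix BFS per component with a per-cell monotone neighbourhood-closure fixpoint (25 saturation rounds) and counted the cells whose component has size >= 3 directly; no visited bookkeeping or queue.
import Mathlib
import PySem

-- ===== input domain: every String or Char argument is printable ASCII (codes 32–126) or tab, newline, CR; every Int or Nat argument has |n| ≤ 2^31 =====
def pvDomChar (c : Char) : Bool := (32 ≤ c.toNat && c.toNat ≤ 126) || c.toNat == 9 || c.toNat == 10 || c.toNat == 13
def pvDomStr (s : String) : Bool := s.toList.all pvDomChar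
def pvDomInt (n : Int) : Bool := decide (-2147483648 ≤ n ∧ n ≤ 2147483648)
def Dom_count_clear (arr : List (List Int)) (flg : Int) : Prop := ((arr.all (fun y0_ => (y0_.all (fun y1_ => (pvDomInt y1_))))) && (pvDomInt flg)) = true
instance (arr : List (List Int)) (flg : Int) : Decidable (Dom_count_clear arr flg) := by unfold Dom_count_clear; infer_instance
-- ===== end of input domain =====

-- B replaces the visited-matrix BFS with a per-cell neighbourhood-closure fixpoint; both Pythons
-- mutate arr in place when flg == 1 (same cells); the equivalence proved here is about the return value.

-- ===== PORT A =====

-- arr[i][j] / v[i][j]: exact for indices that are in range (all reads sit behind 0≤·<5 guards or under Pre_)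
def pvGet2 (a : List (List Int)) (i j : Int) : Int :=
  (PySem.List.pyGet? ((PySem.List.pyGet? a i).getD []) j).getD 0

-- arr[i][j] = x: used only with indices the guards prove nonnegative, where toNat is exact
def pvSet2 (a : List (List Int)) (i j : Int) (x : Int) : List (List Int) :=
  a.modify i.toNat (fun row => row.set j.toNat x)

-- zip(dis, djs)
def pvDirs : List (Int × Int) := [(-1, 0), (1, 0), (0, -1), (0, 1)]

-- state: (v, cnt, q, sset)
def pvBody (arr : List (List Int)) (i j : Int)
    (st : List (List Int) × Int × List (Int × Int) × PySem.Set (Int × Int)) (d : Int × Int) :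
    List (List Int) × Int × List (Int × Int) × PySem.Set (Int × Int) :=
  let ni := i + d.1
  let nj := j + d.2
  if 0 ≤ ni ∧ ni < 5 ∧ 0 ≤ nj ∧ nj < 5 ∧ pvGet2 st.1 ni nj = 0 ∧ pvGet2 arr i j = pvGet2 arr ni nj then
    (pvSet2 st.1 ni nj 1, st.2.1 + 1, st.2.2.1 ++ [(ni, nj)], PySem.Set.add st.2.2.2 (ni, nj))
  else st

-- the 'while q:' loop of bfs; fuel is a totality guard only (never exhausted from count_clear)
def pvBfsLoop (arr : List (List Int)) (fuel : Nat) (v : List (List Int))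
    (q : List (Int × Int)) (cnt : Int) (sset : PySem.Set (Int × Int)) :
    List (List Int) × Int × PySem.Set (Int × Int) :=
  match fuel, q with
  | 0, _ => (v, cnt, sset)
  | _ + 1, [] => (v, cnt, sset)
  | fuel + 1, (i, j) :: q =>
    let s := pvDirs.foldl (pvBody arr i j) (v, cnt, q, sset)
    pvBfsLoop arr fuel s.1 s.2.2.1 s.2.1 s.2.2.2

-- bfs: returns (arr', v', ret); arr' carries the flg == 1 clearing
def pvBfs (arr v : List (List Int)) (i j flg : Int) :
    List (List Int) × List (List Int) × Int :=
  let v1 := pvSet2 v i j 1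
  let r := pvBfsLoop arr 200 v1 [(i, j)] 1 (PySem.Set.add PySem.Set.empty (i, j))
  if r.2.1 ≥ 3 then
    (if flg = 1 then r.2.2.foldl (fun a p => pvSet2 a p.1 p.2 0) arr else arr, r.1, r.2.1)
  else (arr, r.1, 0)

def count_clear (arr : List (List Int)) (flg : Int) : Int :=
  let v0 := List.replicate 5 (List.replicate 5 (0 : Int))
  let s := (PySem.List.pyRange 0 5 1).foldl (fun st i =>
      (PySem.List.pyRange 0 5 1).foldl
        (fun (st : List (List Int) × List (List Int) × Int) j =>
          if pvGet2 st.2.1 i j = 0 then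
            let r := pvBfs st.1 st.2.1 i j flg
            (r.1, r.2.1, st.2.2 + r.2.2)
          else st) st) (arr, v0, (0 : Int))
  s.2.2

-- ===== PORT B =====

-- the inner set comprehension of comp: all in-bounds equal-valued neighbours of cells
def pvNbrs (arr : List (List Int)) (cells : PySem.Set (Int × Int)) : List (Int × Int) :=
  cells.flatMap (fun p => pvDirs.filterMap (fun d =>
    let ni := p.1 + d.1
    let nj := p.2 + d.2
    if 0 ≤ ni ∧ ni < 5 ∧ 0 ≤ nj ∧ nj < 5 ∧ pvGet2 arr ni nj = pvGet2 arr p.1 p.2 then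
      some (ni, nj)
    else none))

-- cells = cells | {...}
def pvStep (arr : List (List Int)) (cells : PySem.Set (Int × Int)) : PySem.Set (Int × Int) :=
  PySem.Set.union cells (pvNbrs arr cells)

-- comp(i, j): 25 saturation rounds
def pvComp (arr : List (List Int)) (i j : Int) : PySem.Set (Int × Int) :=
  (List.range 25).foldl (fun cells _ => pvStep arr cells)
    (PySem.Set.add PySem.Set.empty (i, j))

def count_clear_alt (arr : List (List Int)) (flg : Int) : Int :=
  let big := (PySem.List.pyRange 0 5 1).flatMap (fun i =>
    (PySem.List.pyRange 0 5 1).filterMap (fun j =>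
      if 3 ≤ (pvComp arr i j).length then some (i, j) else none))
  (big.length : Int)

-- ===== PRECONDITION & SPEC =====
-- Pre_ excludes exactly the inputs where A raises IndexError: fewer than 5 rows, or one of the
-- first 5 rows shorter than 5 (B raises there too).
def Pre_count_clear (arr : List (List Int)) (flg : Int) : Prop :=
  5 ≤ arr.length ∧ ∀ row ∈ arr.take 5, 5 ≤ row.length
instance (arr : List (List Int)) (flg : Int) : Decidable (Pre_count_clear arr flg) := by
  unfold Pre_count_clear; infer_instance

def pvWitness_count_clear : List (List Int) × Int :=
  ([[1, 1, 1, 2, 3], [4, 1, 2, 2, 3], [5, 6, 2, 7, 3], [8, 9, 2, 7, 7], [1, 2, 3, 4, 5]], 1)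

def Spec_count_clear (arr : List (List Int)) (flg : Int) (out : Int) : Prop := out = count_clear_alt arr flg
instance (arr : List (List Int)) (flg : Int) (out : Int) : Decidable (Spec_count_clear arr flg out) := by unfold Spec_count_clear; infer_instance

-- ===== CLAIM (what is proved, stated in full; the proofs are below) =====
def Claim_equal_count_clear : Prop := ∀ (arr : List (List Int)) (flg : Int), Dom_count_clear arr flg → Pre_count_clear arr flg → Spec_count_clear arr flg (count_clear arr flg)

-- ===== LEMMAS AND PROOFS =====

def pvCells : List (Int × Int) :=
  ([0, 1, 2, 3, 4] : List Int).flatMap (fun i => ([0, 1, 2, 3, 4] : List Int).map (fun j => (i, j)))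

def pvGrid : Finset (Int × Int) := pvCells.toFinset

abbrev pvAdj (arr : List (List Int)) (p q : Int × Int) : Prop :=
  p ∈ pvGrid ∧ q ∈ pvGrid ∧ (∃ d ∈ pvDirs, q = (p.1 + d.1, p.2 + d.2)) ∧
    pvGet2 arr q.1 q.2 = pvGet2 arr p.1 p.2

lemma mem_pvGrid {p : Int × Int} : p ∈ pvGrid ↔ 0 ≤ p.1 ∧ p.1 < 5 ∧ 0 ≤ p.2 ∧ p.2 < 5 := by
  rcases p with ⟨x, y⟩
  simp only [pvGrid, pvCells, List.mem_toFinset, List.mem_flatMap, List.mem_map,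
    List.mem_cons, List.not_mem_nil, or_false, Prod.mk.injEq]
  constructor
  · rintro ⟨i, hi, j, hj, rfl, rfl⟩
    rcases hi with rfl|rfl|rfl|rfl|rfl <;> rcases hj with rfl|rfl|rfl|rfl|rfl <;> norm_num
  · rintro ⟨hx0, hx5, hy0, hy5⟩
    refine ⟨x, by omega, y, by omega, rfl, rfl⟩

lemma card_pvGrid : pvGrid.card = 25 := by decide

lemma pvAdj_symm {arr : List (List Int)} {p q : Int × Int} (h : pvAdj arr p q) : pvAdj arr q p := by
  obtain ⟨hp, hq, ⟨d, hd, rfl⟩, hval⟩ := h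
  refine ⟨hq, hp, ⟨(-d.1, -d.2), ?_, by simp⟩, hval.symm⟩
  simp only [pvDirs, List.mem_cons, List.not_mem_nil, or_false] at hd ⊢
  rcases hd with h | h | h | h <;> subst h <;> norm_num

def Good (S : List (Int × Int)) : Prop := S.Nodup ∧ ∀ p ∈ S, p ∈ pvGrid

lemma mem_pvNbrs {arr : List (List Int)} {S : List (Int × Int)} (hG : Good S) {y : Int × Int} :
    y ∈ pvNbrs arr S ↔ ∃ x ∈ S, pvAdj arr x y := by
  simp only [pvNbrs, List.mem_flatMap, List.mem_filterMap]
  constructor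
  · rintro ⟨x, hx, d, hd, hsome⟩
    split_ifs at hsome with hcond
    all_goals cases hsome
    obtain ⟨h1, h2, h3, h4, h5⟩ := hcond
    exact ⟨x, hx, hG.2 x hx, mem_pvGrid.2 ⟨h1, h2, h3, h4⟩, ⟨d, hd, rfl⟩, h5⟩
  · rintro ⟨x, hx, _, hy, ⟨d, hd, rfl⟩, hval⟩
    refine ⟨x, hx, d, hd, ?_⟩
    rw [if_pos]
    rw [mem_pvGrid] at hy
    exact ⟨hy.1, hy.2.1, hy.2.2.1, hy.2.2.2, hval⟩

lemma mem_pvStep {arr : List (List Int)} {S : List (Int × Int)} (hG : Good S) {y : Int × Int} :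
    y ∈ pvStep arr S ↔ y ∈ S ∨ ∃ x ∈ S, pvAdj arr x y := by
  rw [pvStep, PySem.Set.mem_union, mem_pvNbrs hG]

lemma good_pvStep {arr : List (List Int)} {S : List (Int × Int)} (hG : Good S) :
    Good (pvStep arr S) := by
  refine ⟨PySem.Set.nodup_union _ _ hG.1, fun p hp => ?_⟩
  rcases (mem_pvStep hG).1 hp with h | ⟨x, _, hadj⟩
  · exact hG.2 p h
  · exact hadj.2.1

-- iterate view of pvComp
lemma foldl_range_iterate {α : Type} (f : α → α) (a : α) (n : Nat) :
    (List.range n).foldl (fun s _ => f s) a = f^[n] a := by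
  induction n with
  | zero => rfl
  | succ n ih => rw [List.range_succ, List.foldl_append, ih, Function.iterate_succ_apply']; rfl

def pvIter (arr : List (List Int)) (c : Int × Int) (n : Nat) : PySem.Set (Int × Int) :=
  (pvStep arr)^[n] [c]

lemma pvComp_eq_iter (arr : List (List Int)) (i j : Int) :
    pvComp arr i j = pvIter arr (i, j) 25 := by
  rw [pvComp, foldl_range_iterate]; rfl

lemma good_iter {arr : List (List Int)} {c : Int × Int} (hc : c ∈ pvGrid) (n : Nat) :
    Good (pvIter arr c n) := by
  induction n with
  | zero =>
    refine ⟨List.nodup_singleton c, fun p hp => ?_⟩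
    simp only [pvIter, Function.iterate_zero, id, List.mem_singleton] at hp
    subst hp; exact hc
  | succ n ih => rw [pvIter, Function.iterate_succ_apply']; exact good_pvStep ih

lemma iter_succ {arr : List (List Int)} {c : Int × Int} (n : Nat) :
    pvIter arr c (n + 1) = pvStep arr (pvIter arr c n) := by
  rw [pvIter, Function.iterate_succ_apply']; rfl

-- prefix structure: one saturation round only appends
lemma update_append (s : PySem.Set (Int × Int)) (t : List (Int × Int)) :
    ∃ e, PySem.Set.update s t = s ++ e := by
  induction t generalizing s with
  | nil => exact ⟨[], by rw [PySem.Set.update_nil, List.append_nil]⟩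
  | cons x t ih =>
    rw [PySem.Set.update_cons, PySem.Set.add_eq_ite]
    split_ifs with h
    · exact ih s
    · obtain ⟨e, he⟩ := ih (s ++ [x])
      exact ⟨x :: e, by rw [he, List.append_assoc]; rfl⟩

lemma pvStep_append (arr : List (List Int)) (S : PySem.Set (Int × Int)) :
    ∃ e, pvStep arr S = S ++ e := update_append S _

lemma iter_append {arr : List (List Int)} {c : Int × Int} {m n : Nat} (h : m ≤ n) :
    ∃ e, pvIter arr c n = pvIter arr c m ++ e := by
  induction n with
  | zero =>
    have : m = 0 := Nat.le_zero.1 h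
    subst this; exact ⟨[], by simp⟩
  | succ n ih =>
    rcases Nat.lt_or_ge m (n+1) with hlt | hge
    · obtain ⟨e, he⟩ := ih (Nat.lt_succ_iff.1 hlt)
      obtain ⟨e', he'⟩ := pvStep_append arr (pvIter arr c n)
      exact ⟨e ++ e', by rw [iter_succ, he', he, List.append_assoc]⟩
    · have : m = n + 1 := le_antisymm h hge
      exact ⟨[], by simp [this]⟩

lemma iter_len_le {arr : List (List Int)} {c : Int × Int} (hc : c ∈ pvGrid) (n : Nat) :
    (pvIter arr c n).length ≤ 25 := by
  have hG := good_iter (arr := arr) hc n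
  have h1 : (pvIter arr c n).toFinset.card = (pvIter arr c n).length :=
    List.toFinset_card_of_nodup hG.1
  have h2 : (pvIter arr c n).toFinset ⊆ pvGrid := by
    intro x hx; exact hG.2 x (List.mem_toFinset.1 hx)
  have := Finset.card_le_card h2
  rw [h1, card_pvGrid] at this; exact this

lemma iter_fixed_of_eq {arr : List (List Int)} {c : Int × Int} {k : Nat}
    (h : pvIter arr c (k + 1) = pvIter arr c k) (n : Nat) (hn : k ≤ n) :
    pvIter arr c n = pvIter arr c k := by
  induction n with
  | zero => simp [Nat.le_zero.1 hn]
  | succ n ih =>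
    rcases Nat.lt_or_ge k (n+1) with hlt | hge
    · have hk : k ≤ n := Nat.lt_succ_iff.1 hlt
      rw [iter_succ, ih hk, ← iter_succ, h]
    · exact (le_antisymm hn hge) ▸ rfl

lemma exists_fixpoint {arr : List (List Int)} {c : Int × Int} (hc : c ∈ pvGrid) :
    ∃ k ≤ 24, pvIter arr c (k + 1) = pvIter arr c k := by
  by_contra hno
  push_neg at hno
  have grow : ∀ k ≤ 24, (pvIter arr c k).length + 1 ≤ (pvIter arr c (k + 1)).length := by
    intro k hk
    obtain ⟨e, he⟩ := iter_append (arr := arr) (c := c) (Nat.le_succ k)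
    have hne : e ≠ [] := by
      intro h; apply hno k hk; rw [he, h, List.append_nil]
    rw [he, List.length_append]
    have : 1 ≤ e.length := List.length_pos_iff.2 hne
    omega
  have main : ∀ k, k ≤ 25 → k + 1 ≤ (pvIter arr c k).length := by
    intro k
    induction k with
    | zero => intro _; simp [pvIter]
    | succ k ih =>
      intro hk
      have h1 := ih (by omega)
      have h2 := grow k (by omega)
      omega
  have := main 25 le_rfl
  have := iter_len_le (arr := arr) hc 25
  omega

lemma pvComp_closed {arr : List (List Int)} {i j : Int} (hc : (i, j) ∈ pvGrid)
    {x y : Int × Int} (hx : x ∈ pvComp arr i j) (hadj : pvAdj arr x y) :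
    y ∈ pvComp arr i j := by
  obtain ⟨k, hk, hfix⟩ := exists_fixpoint (arr := arr) (c := (i, j)) hc
  have h25 : pvIter arr (i, j) 25 = pvIter arr (i, j) k :=
    iter_fixed_of_eq hfix 25 (by omega)
  have hstep : pvStep arr (pvIter arr (i, j) 25) = pvIter arr (i, j) 25 := by
    rw [h25, ← iter_succ, hfix]
  rw [pvComp_eq_iter] at hx ⊢
  rw [← hstep]
  exact (mem_pvStep (good_iter hc 25)).2 (Or.inr ⟨x, hx, hadj⟩)

lemma self_mem_pvComp {arr : List (List Int)} (i j : Int) : (i, j) ∈ pvComp arr i j := by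
  rw [pvComp_eq_iter]
  obtain ⟨e, he⟩ := iter_append (arr := arr) (c := (i, j)) (Nat.zero_le 25)
  rw [he]; exact List.mem_append_left _ (by simp [pvIter])

lemma pvComp_min {arr : List (List Int)} {i j : Int} (T : Int × Int → Prop)
    (hT0 : T (i, j)) (hTc : ∀ x y, T x → pvAdj arr x y → T y) (hc : (i, j) ∈ pvGrid) :
    ∀ x ∈ pvComp arr i j, T x := by
  rw [pvComp_eq_iter]
  have : ∀ n, ∀ x ∈ pvIter arr (i, j) n, T x := by
    intro n
    induction n with
    | zero =>
      intro x hx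
      simp only [pvIter, Function.iterate_zero, id, List.mem_singleton] at hx
      subst hx; exact hT0
    | succ n ih =>
      intro x hx
      rw [iter_succ] at hx
      rcases (mem_pvStep (good_iter hc n)).1 hx with h | ⟨z, hz, hadj⟩
      · exact ih x h
      · exact hTc z x (ih z hz) hadj
  exact this 25

lemma nodup_pvComp {arr : List (List Int)} {i j : Int} (hc : (i, j) ∈ pvGrid) :
    (pvComp arr i j).Nodup := by rw [pvComp_eq_iter]; exact (good_iter hc 25).1

lemma pvComp_sub_grid {arr : List (List Int)} {i j : Int} (hc : (i, j) ∈ pvGrid) :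
    ∀ x ∈ pvComp arr i j, x ∈ pvGrid := by
  rw [pvComp_eq_iter]; exact (good_iter hc 25).2

-- component as a Finset
def pvK (arr : List (List Int)) (p : Int × Int) : Finset (Int × Int) :=
  (pvComp arr p.1 p.2).toFinset

lemma mem_pvK {arr : List (List Int)} {p x : Int × Int} :
    x ∈ pvK arr p ↔ x ∈ pvComp arr p.1 p.2 := List.mem_toFinset

lemma self_mem_pvK {arr : List (List Int)} (p : Int × Int) : p ∈ pvK arr p := by
  rw [mem_pvK]; exact self_mem_pvComp p.1 p.2

lemma pvK_sub_grid {arr : List (List Int)} {p : Int × Int} (hp : p ∈ pvGrid) :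
    pvK arr p ⊆ pvGrid := by
  intro x hx
  exact pvComp_sub_grid (by rcases p with ⟨i, j⟩; exact hp) x (mem_pvK.1 hx)

lemma pvK_closed {arr : List (List Int)} {p x y : Int × Int} (hp : p ∈ pvGrid)
    (hx : x ∈ pvK arr p) (hadj : pvAdj arr x y) : y ∈ pvK arr p :=
  mem_pvK.2 (pvComp_closed (by rcases p with ⟨i, j⟩; exact hp) (mem_pvK.1 hx) hadj)

set_option maxHeartbeats 1000000 in
lemma pvK_min {arr : List (List Int)} {p : Int × Int} (T : Int × Int → Prop)
    (hT0 : T p) (hTc : ∀ x y, T x → pvAdj arr x y → T y) (hp : p ∈ pvGrid) :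
    ∀ x ∈ pvK arr p, T x := by
  rcases p with ⟨i, j⟩
  intro x hx
  rw [mem_pvK] at hx
  exact pvComp_min T hT0 hTc hp x hx

lemma pvK_sub_of_mem {arr : List (List Int)} {p q : Int × Int} (hp : p ∈ pvGrid)
    (hq : q ∈ pvGrid) (h : q ∈ pvK arr p) : pvK arr q ⊆ pvK arr p :=
  fun x hx => pvK_min (arr := arr) (· ∈ pvK arr p) h (fun a b ha hab => pvK_closed hp ha hab) hq x hx

lemma mem_pvK_symm {arr : List (List Int)} {p q : Int × Int} (hp : p ∈ pvGrid)
    (hq : q ∈ pvGrid) (h : q ∈ pvK arr p) : p ∈ pvK arr q := by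
  have : ∀ x ∈ pvK arr p, x ∈ pvGrid ∧ p ∈ pvK arr x := by
    refine pvK_min _ ⟨hp, self_mem_pvK p⟩ ?_ hp
    rintro x y ⟨hxg, hpx⟩ hadj
    have hyg : y ∈ pvGrid := hadj.2.1
    have hxy : x ∈ pvK arr y := pvK_closed hyg (self_mem_pvK y) (pvAdj_symm hadj)
    exact ⟨hyg, pvK_sub_of_mem hyg hxg hxy hpx⟩
  exact (this q h).2

lemma pvK_eq_of_mem {arr : List (List Int)} {p q : Int × Int} (hp : p ∈ pvGrid)
    (hq : q ∈ pvGrid) (h : q ∈ pvK arr p) : pvK arr q = pvK arr p :=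
  le_antisymm (pvK_sub_of_mem hp hq h) (pvK_sub_of_mem hq hp (mem_pvK_symm hp hq h))

lemma card_pvK {arr : List (List Int)} {p : Int × Int} (hp : p ∈ pvGrid) :
    (pvK arr p).card = (pvComp arr p.1 p.2).length :=
  List.toFinset_card_of_nodup (nodup_pvComp (by rcases p with ⟨i, j⟩; exact hp))

lemma card_pvK_le {arr : List (List Int)} {p : Int × Int} (hp : p ∈ pvGrid) :
    (pvK arr p).card ≤ 25 := by
  have := Finset.card_le_card (pvK_sub_grid (arr := arr) hp)
  rwa [card_pvGrid] at this

-- ===== get2 / set2 machinery =====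
abbrev ShapeGE (a : List (List Int)) : Prop := 5 ≤ a.length ∧ ∀ row ∈ a.take 5, 5 ≤ row.length

lemma get2_of_nonneg {a : List (List Int)} {i j : Int} (hi : 0 ≤ i) (hj : 0 ≤ j) :
    pvGet2 a i j = ((a[i.toNat]?).getD [])[j.toNat]?.getD 0 := by
  rw [pvGet2, PySem.List.pyGet?_of_nonneg a hi, PySem.List.pyGet?_of_nonneg _ hj]

lemma shape_row_len {a : List (List Int)} (hS : ShapeGE a) {k : Nat} (hk : k < 5) :
    5 ≤ ((a[k]?).getD []).length := by
  have h5 := hS.1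
  have h1 : k < a.length := by omega
  rw [List.getElem?_eq_getElem h1, Option.getD_some]
  exact hS.2 _ (List.mem_take_iff_getElem.2 ⟨k, by omega, rfl⟩)

lemma shape_set2 {a : List (List Int)} (hS : ShapeGE a) (i j x : Int) :
    ShapeGE (pvSet2 a i j x) := by
  constructor
  · rw [pvSet2, List.length_modify]; exact hS.1
  · intro row hrow
    rw [List.mem_take_iff_getElem] at hrow
    obtain ⟨k, hk, hrow⟩ := hrow
    simp only [pvSet2, List.length_modify] at hk
    subst hrow
    simp only [pvSet2, List.getElem_modify]
    split_ifs with h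
    · rw [List.length_set]
      exact hS.2 _ (List.mem_take_iff_getElem.2 ⟨k, by omega, rfl⟩)
    · exact hS.2 _ (List.mem_take_iff_getElem.2 ⟨k, by omega, rfl⟩)

lemma get2_set2_eq {a : List (List Int)} {i j : Int} (hS : ShapeGE a)
    (hi0 : 0 ≤ i) (hi : i < 5) (hj0 : 0 ≤ j) (hj : j < 5) (x : Int) :
    pvGet2 (pvSet2 a i j x) i j = x := by
  rw [get2_of_nonneg hi0 hj0]
  have h5 := hS.1
  have h1 : i.toNat < a.length := by omega
  have hrow : 5 ≤ ((a[i.toNat]?).getD []).length := shape_row_len hS (by omega)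
  rw [List.getElem?_eq_getElem h1, Option.getD_some] at hrow
  have h2 : j.toNat < a[i.toNat].length := by omega
  simp [pvSet2, List.getElem?_modify, List.getElem?_eq_getElem h1, List.getElem?_set, h2]

lemma get2_set2_ne {a : List (List Int)} {i j u w : Int}
    (hi0 : 0 ≤ i) (hj0 : 0 ≤ j) (hu0 : 0 ≤ u) (hw0 : 0 ≤ w)
    (hne : (u, w) ≠ (i, j)) (x : Int) :
    pvGet2 (pvSet2 a i j x) u w = pvGet2 a u w := by
  rw [get2_of_nonneg hu0 hw0, get2_of_nonneg hu0 hw0]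
  simp only [pvSet2, List.getElem?_modify]
  by_cases hui : i.toNat = u.toNat
  · have huieq : u = i := by omega
    subst huieq
    have hwj : w ≠ j := fun h => hne (by rw [h])
    cases h : a[u.toNat]? with
    | none => simp [h]
    | some row =>
      have hne2 : j.toNat ≠ w.toNat := by omega
      simp [h, List.getElem?_set_ne hne2]
  · simp [hui]

-- visited-matrix abstraction
def Vrepr (v : List (List Int)) (S : Finset (Int × Int)) : Prop :=
  ShapeGE v ∧ ∀ p ∈ pvGrid, (pvGet2 v p.1 p.2 = 0 ↔ p ∉ S)

lemma vrepr_v0 : Vrepr (List.replicate 5 (List.replicate 5 (0 : Int))) ∅ :=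
  ⟨by decide, by decide⟩

lemma vrepr_set2 {v : List (List Int)} {S : Finset (Int × Int)} {t : Int × Int}
    (h : Vrepr v S) (ht : t ∈ pvGrid) : Vrepr (pvSet2 v t.1 t.2 1) (S ∪ {t}) := by
  obtain ⟨htx, hty⟩ : (0 ≤ t.1 ∧ t.1 < 5) ∧ (0 ≤ t.2 ∧ t.2 < 5) := by
    have := mem_pvGrid.1 ht; exact ⟨⟨this.1, this.2.1⟩, ⟨this.2.2.1, this.2.2.2⟩⟩
  refine ⟨shape_set2 h.1 _ _ _, fun p hp => ?_⟩
  have hpg := mem_pvGrid.1 hp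
  rcases eq_or_ne p t with rfl | hpt
  · rw [get2_set2_eq h.1 htx.1 htx.2 hty.1 hty.2]
    simp
  · have : (p.1, p.2) ≠ (t.1, t.2) := by
      intro hcontra
      exact hpt (Prod.ext (congrArg Prod.fst hcontra) (congrArg Prod.snd hcontra))
    rw [get2_set2_ne htx.1 hty.1 hpg.1 hpg.2.2.1 this]
    rw [h.2 p hp]
    simp [hpt]

-- ===== BFS (port A) characterization =====
def Ctx (arr0 arr : List (List Int)) (V K : Finset (Int × Int)) (c : Int × Int) : Prop :=
  V ⊆ pvGrid ∧ c ∈ pvGrid ∧ K = pvK arr0 c ∧ Disjoint V K ∧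
  (∀ p ∈ pvGrid, p ∉ V → pvGet2 arr p.1 p.2 = pvGet2 arr0 p.1 p.2)

lemma ctx_Ksub {arr0 arr V K c} (h : Ctx arr0 arr V K c) : K ⊆ pvGrid := by
  rw [h.2.2.1]; exact pvK_sub_grid h.2.1

lemma ctx_Kclosed {arr0 arr V K c} (h : Ctx arr0 arr V K c) :
    ∀ x ∈ K, ∀ y, pvAdj arr0 x y → y ∈ K := by
  intro x hx y hy
  rw [h.2.2.1] at hx ⊢
  exact pvK_closed h.2.1 hx hy

lemma ctx_Kmin {arr0 arr V K c} (h : Ctx arr0 arr V K c) (T : Int × Int → Prop)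
    (hT0 : T c) (hTc : ∀ x y, T x → pvAdj arr0 x y → T y) : ∀ x ∈ K, T x := by
  rw [h.2.2.1]; exact pvK_min T hT0 hTc h.2.1

-- loop-head invariant
def LInv (arr0 arr : List (List Int)) (V K : Finset (Int × Int)) (c : Int × Int)
    (M : Finset (Int × Int)) (v : List (List Int)) (q : List (Int × Int)) (cnt : Int)
    (sset : PySem.Set (Int × Int)) : Prop :=
  Vrepr v (V ∪ M) ∧ M ⊆ K ∧ c ∈ M ∧ (∀ p ∈ q, p ∈ M) ∧ q.Nodup ∧
  (∀ x ∈ M, x ∉ q → ∀ y, pvAdj arr0 x y → y ∈ M) ∧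
  cnt = (M.card : Int) ∧ sset.Nodup ∧ sset.toFinset = M

-- mid-pop invariant (closedness excuses the popped cell pij)
def BInv (arr0 arr : List (List Int)) (V K : Finset (Int × Int)) (c pij : Int × Int)
    (M : Finset (Int × Int))
    (st : List (List Int) × Int × List (Int × Int) × PySem.Set (Int × Int)) : Prop :=
  Vrepr st.1 (V ∪ M) ∧ M ⊆ K ∧ c ∈ M ∧ pij ∈ M ∧ (∀ p ∈ st.2.2.1, p ∈ M) ∧
  st.2.2.1.Nodup ∧
  (∀ x ∈ M, x ∉ st.2.2.1 → x ≠ pij → ∀ y, pvAdj arr0 x y → y ∈ M) ∧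
  st.2.1 = (M.card : Int) ∧ st.2.2.2.Nodup ∧ st.2.2.2.toFinset = M

lemma pvBody_spec {arr0 arr : List (List Int)} {V K : Finset (Int × Int)} {c pij : Int × Int}
    (hctx : Ctx arr0 arr V K c) {d : Int × Int} (hd : d ∈ pvDirs) {M : Finset (Int × Int)}
    {st : List (List Int) × Int × List (Int × Int) × PySem.Set (Int × Int)}
    (h : BInv arr0 arr V K c pij M st) :
    ∃ M', M ⊆ M' ∧ BInv arr0 arr V K c pij M' (pvBody arr pij.1 pij.2 st d) ∧
      (pvAdj arr0 pij (pij.1 + d.1, pij.2 + d.2) → (pij.1 + d.1, pij.2 + d.2) ∈ M') ∧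
      5 * (K.card - M'.card) + (pvBody arr pij.1 pij.2 st d).2.2.1.length
        ≤ 5 * (K.card - M.card) + st.2.2.1.length := by
  obtain ⟨hvr, hMK, hcM, hpM, hqM, hqN, hcl, hcnt, hsN, hsM⟩ := h
  set t : Int × Int := (pij.1 + d.1, pij.2 + d.2) with ht
  have hpijK : pij ∈ K := hMK hpM
  have hpijg : pij ∈ pvGrid := ctx_Ksub hctx hpijK
  have hpijV : pij ∉ V := fun hv => (Finset.disjoint_left.1 hctx.2.2.2.1 hv) hpijK
  -- the guard, rephrased
  have hguard : (0 ≤ t.1 ∧ t.1 < 5 ∧ 0 ≤ t.2 ∧ t.2 < 5 ∧ pvGet2 st.1 t.1 t.2 = 0 ∧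
      pvGet2 arr pij.1 pij.2 = pvGet2 arr t.1 t.2) ↔
      (pvAdj arr0 pij t ∧ t ∉ V ∪ M) := by
    constructor
    · rintro ⟨h1, h2, h3, h4, h5, h6⟩
      have htg : t ∈ pvGrid := mem_pvGrid.2 ⟨h1, h2, h3, h4⟩
      have htVM : t ∉ V ∪ M := (hvr.2 t htg).1 h5
      have htV : t ∉ V := fun hv => htVM (Finset.mem_union_left _ hv)
      refine ⟨⟨hpijg, htg, ⟨d, hd, rfl⟩, ?_⟩, htVM⟩
      rw [hctx.2.2.2.2 t htg htV, hctx.2.2.2.2 pij hpijg hpijV] at h6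
      exact h6.symm
    · rintro ⟨⟨_, htg, _, hval⟩, htVM⟩
      have htV : t ∉ V := fun hv => htVM (Finset.mem_union_left _ hv)
      have hb := mem_pvGrid.1 htg
      refine ⟨hb.1, hb.2.1, hb.2.2.1, hb.2.2.2, (hvr.2 t htg).2 htVM, ?_⟩
      rw [hctx.2.2.2.2 t htg htV, hctx.2.2.2.2 pij hpijg hpijV]
      exact hval.symm
  rw [pvBody]
  by_cases hC : pvAdj arr0 pij t ∧ t ∉ V ∪ M
  · rw [if_pos (hguard.2 hC)]
    obtain ⟨hadj, htVM⟩ := hC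
    have htg : t ∈ pvGrid := hadj.2.1
    have htM : t ∉ M := fun hm => htVM (Finset.mem_union_right _ hm)
    have htK : t ∈ K := ctx_Kclosed hctx pij hpijK t hadj
    refine ⟨insert t M, Finset.subset_insert t M, ?_, fun _ => Finset.mem_insert_self t M, ?_⟩
    · refine ⟨?_, ?_, Finset.mem_insert_of_mem hcM, Finset.mem_insert_of_mem hpM, ?_, ?_, ?_, ?_, ?_, ?_⟩
      · have := vrepr_set2 hvr htg
        have hU : (V ∪ M) ∪ {t} = V ∪ insert t M := by
          rw [Finset.union_assoc, Finset.union_singleton]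
        rwa [hU] at this
      · intro x hx
        rcases Finset.mem_insert.1 hx with rfl | hx
        · exact htK
        · exact hMK hx
      · intro p hp
        rcases List.mem_append.1 hp with hp | hp
        · exact Finset.mem_insert_of_mem (hqM p hp)
        · rw [List.mem_singleton.1 hp]; exact Finset.mem_insert_self t M
      · refine List.Nodup.append hqN (List.nodup_singleton t) ?_
        intro a ha hb
        rw [List.mem_singleton] at hb
        subst hb
        exact htM (hqM _ ha)
      · intro x hx hxq hxp y hy
        have hxM : x ∈ M := by
          rcases Finset.mem_insert.1 hx with rfl | hx
          · exact absurd (List.mem_append.2 (Or.inr (List.mem_singleton.2 rfl))) hxq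
          · exact hx
        have hxq' : x ∉ st.2.2.1 := fun hq => hxq (List.mem_append.2 (Or.inl hq))
        exact Finset.mem_insert_of_mem (hcl x hxM hxq' hxp y hy)
      · rw [Finset.card_insert_of_notMem htM]
        push_cast [hcnt]; ring
      · exact PySem.Set.nodup_add _ t hsN
      · have htss : t ∉ st.2.2.2 := fun hm => htM (hsM ▸ List.mem_toFinset.2 hm)
        rw [PySem.Set.add_of_not_mem htss, List.toFinset_append]
        simp [hsM]
    · have hMlt : M.card < K.card := by
        have h1 : (insert t M).card = M.card + 1 := Finset.card_insert_of_notMem htM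
        have h2 : (insert t M).card ≤ K.card := Finset.card_le_card (by
          intro x hx
          rcases Finset.mem_insert.1 hx with rfl | hx
          · exact htK
          · exact hMK hx)
        omega
      have h1 : (insert t M).card = M.card + 1 := Finset.card_insert_of_notMem htM
      simp only [List.length_append, List.length_cons, List.length_nil]
      omega
  · rw [if_neg (fun hg => hC (hguard.1 hg))]
    refine ⟨M, Finset.Subset.refl M, ⟨hvr, hMK, hcM, hpM, hqM, hqN, hcl, hcnt, hsN, hsM⟩, ?_, le_rfl⟩
    intro hadj
    have htK : t ∈ K := ctx_Kclosed hctx pij hpijK t hadj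
    have htVM : t ∈ V ∪ M := by
      by_contra hne
      exact hC ⟨hadj, hne⟩
    rcases Finset.mem_union.1 htVM with hv | hm
    · exact absurd htK (Finset.disjoint_left.1 hctx.2.2.2.1 hv)
    · exact hm

lemma pvFold_spec {arr0 arr : List (List Int)} {V K : Finset (Int × Int)} {c pij : Int × Int}
    (hctx : Ctx arr0 arr V K c) {M : Finset (Int × Int)}
    {st : List (List Int) × Int × List (Int × Int) × PySem.Set (Int × Int)}
    (h : BInv arr0 arr V K c pij M st) :
    ∃ M', M ⊆ M' ∧ BInv arr0 arr V K c pij M' (pvDirs.foldl (pvBody arr pij.1 pij.2) st) ∧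
      (∀ y, pvAdj arr0 pij y → y ∈ M') ∧
      5 * (K.card - M'.card) + (pvDirs.foldl (pvBody arr pij.1 pij.2) st).2.2.1.length
        ≤ 5 * (K.card - M.card) + st.2.2.1.length := by
  have hd1 : ((-1 : Int), (0 : Int)) ∈ pvDirs := by simp [pvDirs]
  have hd2 : ((1 : Int), (0 : Int)) ∈ pvDirs := by simp [pvDirs]
  have hd3 : ((0 : Int), (-1 : Int)) ∈ pvDirs := by simp [pvDirs]
  have hd4 : ((0 : Int), (1 : Int)) ∈ pvDirs := by simp [pvDirs]
  obtain ⟨M1, hs1, h1, ha1, hm1⟩ := pvBody_spec hctx hd1 h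
  obtain ⟨M2, hs2, h2, ha2, hm2⟩ := pvBody_spec hctx hd2 h1
  obtain ⟨M3, hs3, h3, ha3, hm3⟩ := pvBody_spec hctx hd3 h2
  obtain ⟨M4, hs4, h4, ha4, hm4⟩ := pvBody_spec hctx hd4 h3
  have hfold : pvDirs.foldl (pvBody arr pij.1 pij.2) st =
      pvBody arr pij.1 pij.2 (pvBody arr pij.1 pij.2 (pvBody arr pij.1 pij.2
        (pvBody arr pij.1 pij.2 st ((-1), 0)) (1, 0)) (0, (-1))) (0, 1) := by
    simp [pvDirs]
  refine ⟨M4, (hs1.trans hs2).trans (hs3.trans hs4), by rw [hfold]; exact h4, ?_, ?_⟩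
  · intro y hy
    obtain ⟨d, hd, hyeq⟩ := hy.2.2.1
    subst hyeq
    simp only [pvDirs, List.mem_cons, List.not_mem_nil, or_false] at hd
    rcases hd with rfl | rfl | rfl | rfl
    · exact hs2.trans (hs3.trans hs4) (ha1 hy)
    · exact hs3.trans hs4 (ha2 hy)
    · exact hs4 (ha3 hy)
    · exact ha4 hy
  · rw [hfold]; omega

lemma pvBfsLoop_spec {arr0 arr : List (List Int)} {V K : Finset (Int × Int)} {c : Int × Int}
    (hctx : Ctx arr0 arr V K c) :
    ∀ (fuel : Nat) (M : Finset (Int × Int)) (v : List (List Int)) (q : List (Int × Int))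
      (cnt : Int) (sset : PySem.Set (Int × Int)),
      LInv arr0 arr V K c M v q cnt sset →
      5 * (K.card - M.card) + q.length < fuel →
      ∃ v' sset', pvBfsLoop arr fuel v q cnt sset = (v', (K.card : Int), sset') ∧
        Vrepr v' (V ∪ K) ∧ sset'.Nodup ∧ sset'.toFinset = K := by
  intro fuel
  induction fuel with
  | zero => intro M v q cnt sset _ hf; omega
  | succ fuel ih =>
    intro M v q cnt sset hL hf
    obtain ⟨hvr, hMK, hcM, hqM, hqN, hcl, hcnt, hsN, hsM⟩ := hL
    match q with
    | [] =>
      have hKM : K = M := by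
        apply le_antisymm
        · intro x hx
          exact ctx_Kmin hctx (· ∈ M) hcM
            (fun a b ha hab => hcl a ha (List.not_mem_nil) b hab) x hx
        · exact hMK
      refine ⟨v, sset, ?_, ?_, hsN, by rw [hsM, hKM]⟩
      · rw [pvBfsLoop, hcnt, hKM]
      · rw [← hKM] at hvr
        exact hvr
    | (i, j) :: q' =>
      have hpijM : (i, j) ∈ M := hqM _ (List.mem_cons_self)
      have hB : BInv arr0 arr V K c (i, j) M (v, cnt, q', sset) := by
        refine ⟨hvr, hMK, hcM, hpijM, fun p hp => hqM p (List.mem_cons_of_mem _ hp),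
          (List.nodup_cons.1 hqN).2, ?_, hcnt, hsN, hsM⟩
        intro x hx hxq hxp y hy
        have hxq2 : x ∉ (i, j) :: q' := by
          intro hmem
          rcases List.mem_cons.1 hmem with h | h
          · exact hxp h
          · exact hxq h
        exact hcl x hx hxq2 y hy
      obtain ⟨M', hsub, hB', hnb, hm⟩ := pvFold_spec hctx hB
      rw [pvBfsLoop]
      obtain ⟨hvr', hMK', hcM', hpM', hqM', hqN', hcl', hcnt', hsN', hsM'⟩ := hB'
      apply ih M' _ _ _ _ ⟨hvr', hMK', hcM', hqM', hqN', ?_, hcnt', hsN', hsM'⟩ ?_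
      · intro x hx hxq y hy
        rcases eq_or_ne x (i, j) with rfl | hxp
        · exact hnb y hy
        · exact hcl' x hx hxq hxp y hy
      · have he : ((v, cnt, q', sset).2.2.1) = q' := rfl
        rw [he] at hm
        simp only [List.length_cons] at hf
        omega

-- ===== bfs wrapper and clearing =====
lemma clear_foldl_get (l : List (Int × Int)) (arr : List (List Int))
    (hl : ∀ x ∈ l, x ∈ pvGrid) {p : Int × Int} (hp : p ∈ pvGrid) (hpl : p ∉ l) :
    pvGet2 (l.foldl (fun a q => pvSet2 a q.1 q.2 0) arr) p.1 p.2 = pvGet2 arr p.1 p.2 := by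
  induction l generalizing arr with
  | nil => rfl
  | cons x l ih =>
    rw [List.foldl_cons, ih _ (fun y hy => hl y (List.mem_cons_of_mem _ hy))
      (fun hy => hpl (List.mem_cons_of_mem _ hy))]
    have hxg := mem_pvGrid.1 (hl x List.mem_cons_self)
    have hpg := mem_pvGrid.1 hp
    have hne : (p.1, p.2) ≠ (x.1, x.2) := by
      intro hcontra
      apply hpl
      have : p = x := Prod.ext (congrArg Prod.fst hcontra) (congrArg Prod.snd hcontra)
      rw [this]; exact List.mem_cons_self
    exact get2_set2_ne hxg.1 hxg.2.2.1 hpg.1 hpg.2.2.1 hne 0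

lemma pvBfs_spec {arr0 arr v : List (List Int)} {V : Finset (Int × Int)} {i j flg : Int}
    (hV : V ⊆ pvGrid) (hcg : (i, j) ∈ pvGrid) (hcV : (i, j) ∉ V)
    (hVcl : ∀ p ∈ V, pvK arr0 p ⊆ V)
    (hvr : Vrepr v V)
    (hAg : ∀ p ∈ pvGrid, p ∉ V → pvGet2 arr p.1 p.2 = pvGet2 arr0 p.1 p.2) :
    ∃ arr' v',
      pvBfs arr v i j flg = (arr', v',
        if 3 ≤ (pvK arr0 (i, j)).card then ((pvK arr0 (i, j)).card : Int) else 0) ∧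
      Vrepr v' (V ∪ pvK arr0 (i, j)) ∧
      (∀ p ∈ pvGrid, p ∉ V ∪ pvK arr0 (i, j) → pvGet2 arr' p.1 p.2 = pvGet2 arr p.1 p.2) := by
  have hdisj : Disjoint V (pvK arr0 (i, j)) := by
    rw [Finset.disjoint_left]
    intro x hxV hxK
    have hxg : x ∈ pvGrid := pvK_sub_grid hcg hxK
    have : (i, j) ∈ pvK arr0 x := mem_pvK_symm hcg hxg hxK
    exact hcV (hVcl x hxV this)
  have hctx : Ctx arr0 arr V (pvK arr0 (i, j)) (i, j) := ⟨hV, hcg, rfl, hdisj, hAg⟩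
  have hcb := mem_pvGrid.1 hcg
  have hL : LInv arr0 arr V (pvK arr0 (i, j)) (i, j) {(i, j)} (pvSet2 v i j 1) [(i, j)] 1
      (PySem.Set.add PySem.Set.empty (i, j)) := by
    refine ⟨?_, ?_, Finset.mem_singleton_self _, ?_, List.nodup_singleton _, ?_, ?_, ?_, ?_⟩
    · exact vrepr_set2 hvr hcg
    · intro x hx
      rw [Finset.mem_singleton.1 hx]
      exact self_mem_pvK (i, j)
    · intro p hp
      rw [List.mem_singleton.1 hp]
      exact Finset.mem_singleton_self _
    · intro x hx hq
      exact absurd (List.mem_singleton.2 (Finset.mem_singleton.1 hx)) hq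
    · simp
    · simp [PySem.Set.add, PySem.Set.empty]
    · simp [PySem.Set.add, PySem.Set.empty]
  have hfuel : 5 * ((pvK arr0 (i, j)).card - (({(i, j)} : Finset (Int × Int))).card)
      + ([(i, j)] : List (Int × Int)).length < 200 := by
    have := card_pvK_le (arr := arr0) hcg
    simp only [Finset.card_singleton, List.length_singleton]
    omega
  obtain ⟨v', sset', hloop, hvr', hsN', hsM'⟩ :=
    pvBfsLoop_spec hctx 200 {(i, j)} (pvSet2 v i j 1) [(i, j)] 1
      (PySem.Set.add PySem.Set.empty (i, j)) hL hfuel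
  have hKsub := ctx_Ksub hctx
  by_cases h3 : 3 ≤ (pvK arr0 (i, j)).card
  · have h3' : ((pvK arr0 (i, j)).card : Int) ≥ 3 := by exact_mod_cast h3
    by_cases hflg : flg = 1
    · refine ⟨sset'.foldl (fun a p => pvSet2 a p.1 p.2 0) arr, v', ?_, hvr', ?_⟩
      · rw [pvBfs, hloop]
        simp only [if_pos h3', if_pos hflg, if_pos h3]
      · intro p hp hpVK
        have hpK : p ∉ sset' := by
          intro hmem
          exact hpVK (Finset.mem_union_right _ (hsM' ▸ List.mem_toFinset.2 hmem))
        exact clear_foldl_get sset' arr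
          (fun x hx => hKsub (hsM' ▸ List.mem_toFinset.2 hx)) hp hpK
    · refine ⟨arr, v', ?_, hvr', fun p hp hpVK => rfl⟩
      rw [pvBfs, hloop]
      simp only [if_pos h3', if_neg hflg, if_pos h3]
  · have h3' : ¬ (((pvK arr0 (i, j)).card : Int) ≥ 3) := by
      intro hcontra
      exact h3 (by exact_mod_cast hcontra)
    refine ⟨arr, v', ?_, hvr', fun p hp hpVK => rfl⟩
    rw [pvBfs, hloop]
    simp only [if_neg h3', if_neg h3]

-- ===== outer loop of count_clear =====
def pvOuterBody (flg : Int) (st : List (List Int) × List (List Int) × Int) (c : Int × Int) :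
    List (List Int) × List (List Int) × Int :=
  if pvGet2 st.2.1 c.1 c.2 = 0 then
    let r := pvBfs st.1 st.2.1 c.1 c.2 flg
    (r.1, r.2.1, st.2.2 + r.2.2)
  else st

lemma foldl_prod_flatten {σ α β : Type} (g : σ → α × β → σ) (l1 : List α) (l2 : List β)
    (init : σ) :
    l1.foldl (fun st i => l2.foldl (fun st j => g st (i, j)) st) init
      = (l1.flatMap fun i => l2.map fun j => (i, j)).foldl g init := by
  induction l1 generalizing init with
  | nil => rfl
  | cons a l1 ih =>
    simp only [List.flatMap_cons, List.foldl_append, List.foldl_map, List.foldl_cons, ih]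

lemma count_clear_eq_foldl (arr : List (List Int)) (flg : Int) :
    count_clear arr flg =
      (pvCells.foldl (pvOuterBody flg)
        (arr, List.replicate 5 (List.replicate 5 (0 : Int)), 0)).2.2 := by
  have hr : PySem.List.pyRange 0 5 1 = [(0 : Int), 1, 2, 3, 4] := by decide
  rw [count_clear, hr]
  have hb : (fun (st : List (List Int) × List (List Int) × Int) (i : Int) =>
      List.foldl (fun st j => if pvGet2 st.2.1 i j = 0 then
        let r := pvBfs st.1 st.2.1 i j flg
        (r.1, r.2.1, st.2.2 + r.2.2) else st) st ([0, 1, 2, 3, 4] : List Int))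
      = (fun st i => List.foldl (fun st j => pvOuterBody flg st (i, j)) st
        ([0, 1, 2, 3, 4] : List Int)) := rfl
  rw [hb, foldl_prod_flatten]
  have hl : (([0, 1, 2, 3, 4] : List Int).flatMap fun i =>
      ([0, 1, 2, 3, 4] : List Int).map fun j => ((i, j) : Int × Int)) = pvCells := by decide
  rw [hl]

lemma foldl_invariant {σ α : Type} (f : σ → α → σ) (I : List α → σ → Prop) :
    ∀ (l pre : List α) (st : σ), I pre st →
      (∀ p c s, c ∈ l → I p s → I (p ++ [c]) (f s c)) →
      I (pre ++ l) (l.foldl f st) := by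
  intro l
  induction l with
  | nil => intro pre st h _; simpa using h
  | cons x l ih =>
    intro pre st h hstep
    have h1 := hstep pre x st List.mem_cons_self h
    have h2 := ih (pre ++ [x]) (f st x) h1
      (fun p c s hc hi => hstep p c s (List.mem_cons_of_mem _ hc) hi)
    simpa [List.append_assoc] using h2

def OInv (arr0 : List (List Int)) (P : List (Int × Int))
    (st : List (List Int) × List (List Int) × Int) : Prop :=
  (∀ p ∈ P, p ∈ pvGrid) ∧
  Vrepr st.2.1 (P.toFinset.biUnion (pvK arr0)) ∧
  (∀ p ∈ pvGrid, p ∉ P.toFinset.biUnion (pvK arr0) →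
    pvGet2 st.1 p.1 p.2 = pvGet2 arr0 p.1 p.2) ∧
  st.2.2 = (((P.toFinset.biUnion (pvK arr0)).filter
    (fun x => 3 ≤ (pvK arr0 x).card)).card : Int)

lemma cnt_union_card {arr0 : List (List Int)} {V K : Finset (Int × Int)} {c : Int × Int}

    (hcg : c ∈ pvGrid) (hKdef : K = pvK arr0 c) (hKsub : K ⊆ pvGrid)
    (hdisj : Disjoint V K) :
    (((V ∪ K).filter (fun x => 3 ≤ (pvK arr0 x).card)).card : Int)
      = ((V.filter (fun x => 3 ≤ (pvK arr0 x).card)).card : Int)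
        + (if 3 ≤ K.card then (K.card : Int) else 0) := by
  rw [Finset.filter_union,
    Finset.card_union_of_disjoint (Finset.disjoint_filter_filter hdisj)]
  have hKfix : ∀ x ∈ K, (pvK arr0 x).card = K.card := by
    intro x hx
    rw [hKdef] at hx ⊢
    rw [pvK_eq_of_mem hcg (hKsub (hKdef ▸ hx)) hx]
  have hBval : K.filter (fun x => 3 ≤ (pvK arr0 x).card)
      = if 3 ≤ K.card then K else ∅ := by
    split_ifs with h3
    · ext x
      simp only [Finset.mem_filter]
      exact ⟨fun hx => hx.1, fun hx => ⟨hx, by rw [hKfix x hx]; exact h3⟩⟩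
    · ext x
      simp only [Finset.mem_filter, Finset.notMem_empty, iff_false]
      rintro ⟨hx, hcard⟩
      rw [hKfix x hx] at hcard
      exact h3 hcard
  rw [hBval]
  split_ifs with h3
  · push_cast; ring
  · simp

lemma pvOuter_step {arr0 : List (List Int)} {flg : Int} {P : List (Int × Int)}
    {c : Int × Int} {st : List (List Int) × List (List Int) × Int}
    (hc : c ∈ pvCells) (h : OInv arr0 P st) :
    OInv arr0 (P ++ [c]) (pvOuterBody flg st c) := by
  obtain ⟨hP, hvr, hAg, hcnt⟩ := h
  have hcg : c ∈ pvGrid := List.mem_toFinset.2 hc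
  set V := P.toFinset.biUnion (pvK arr0) with hVdef
  have hVsub : V ⊆ pvGrid := by
    intro x hx
    obtain ⟨d, hd, hxd⟩ := Finset.mem_biUnion.1 hx
    exact pvK_sub_grid (hP d (List.mem_toFinset.1 hd)) hxd
  have hVcl : ∀ p ∈ V, pvK arr0 p ⊆ V := by
    intro p hp
    obtain ⟨d, hd, hpd⟩ := Finset.mem_biUnion.1 hp
    have hdg : d ∈ pvGrid := hP d (List.mem_toFinset.1 hd)
    have hpg : p ∈ pvGrid := pvK_sub_grid hdg hpd
    intro x hx
    rw [pvK_eq_of_mem hdg hpg hpd] at hx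
    exact Finset.mem_biUnion.2 ⟨d, hd, hx⟩
  have hVnew : (P ++ [c]).toFinset.biUnion (pvK arr0) = V ∪ pvK arr0 c := by
    ext x
    simp only [hVdef, Finset.mem_biUnion, List.mem_toFinset, List.mem_append,
      List.mem_singleton, Finset.mem_union]
    constructor
    · rintro ⟨d, hd | rfl, hx⟩
      · exact Or.inl ⟨d, hd, hx⟩
      · exact Or.inr hx
    · rintro (⟨d, hd, hx⟩ | hx)
      · exact ⟨d, Or.inl hd, hx⟩
      · exact ⟨c, Or.inr rfl, hx⟩
  have hPnew : ∀ p ∈ P ++ [c], p ∈ pvGrid := by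
    intro p hp
    rcases List.mem_append.1 hp with hp | hp
    · exact hP p hp
    · rw [List.mem_singleton.1 hp]; exact hcg
  rw [pvOuterBody]
  by_cases h0 : pvGet2 st.2.1 c.1 c.2 = 0
  · have hcV : c ∉ V := by
      have := (hvr.2 c hcg).1
      rcases c with ⟨ci, cj⟩
      exact this h0
    rw [if_pos h0]
    obtain ⟨arr', v', heq, hvr', hag'⟩ :=
      pvBfs_spec (arr0 := arr0) (arr := st.1) (v := st.2.1) (i := c.1) (j := c.2) (flg := flg)
        hVsub (by rcases c with ⟨ci, cj⟩; exact hcg) (by rcases c with ⟨ci, cj⟩; exact hcV)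
        hVcl hvr hAg
    have hceq : ((c.1, c.2) : Int × Int) = c := rfl
    rw [hceq] at heq hvr' hag'
    rw [heq]
    set K := pvK arr0 c with hKdef
    have hKsub : K ⊆ pvGrid := pvK_sub_grid hcg
    have hdisj : Disjoint V K := by
      rw [Finset.disjoint_left]
      intro x hxV hxK
      have hxg : x ∈ pvGrid := hKsub hxK
      exact hcV (hVcl x hxV (mem_pvK_symm hcg hxg hxK))
    refine ⟨hPnew, ?_, ?_, ?_⟩
    · rw [hVnew]; exact hvr'
    · intro p hp hpV
      rw [hVnew] at hpV
      have hpVold : p ∉ V := fun hv => hpV (Finset.mem_union_left _ hv)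
      rw [hag' p hp hpV]
      exact hAg p hp hpVold
    · rw [hVnew]
      have hc4 := cnt_union_card (V := V) hcg hKdef hKsub hdisj
      rw [hc4, hcnt]
  · have hcV : c ∈ V := by
      by_contra hne
      exact h0 ((hvr.2 c hcg).2 (by rcases c with ⟨ci, cj⟩; exact hne))
    rw [if_neg h0]
    have hVK : V ∪ pvK arr0 c = V := Finset.union_eq_left.2 (hVcl c hcV)
    refine ⟨hPnew, by rwa [hVnew, hVK], ?_, by rwa [hVnew, hVK]⟩
    intro p hp hpV
    rw [hVnew, hVK] at hpV
    exact hAg p hp hpV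


-- ===== B-side characterization =====
lemma flatMap_filter {α β : Type} (l : List α) (f : α → List β) (p : β → Bool) :
    (l.flatMap fun a => (f a).filter p) = (l.flatMap f).filter p := by
  induction l with
  | nil => rfl
  | cons x l ih => rw [List.flatMap_cons, List.flatMap_cons, List.filter_append, ih]

lemma inner_eq (arr : List (List Int)) (i : Int) (l2 : List Int) :
    (l2.filterMap fun j => if 3 ≤ (pvComp arr i j).length then some (i, j) else none)
      = (l2.map fun j => ((i, j) : Int × Int)).filter
          (fun x => decide (3 ≤ (pvComp arr x.1 x.2).length)) := by
  induction l2 with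
  | nil => rfl
  | cons b l2 ih =>
    rw [List.filterMap_cons, List.map_cons, List.filter_cons]
    by_cases h : 3 ≤ (pvComp arr i b).length
    · simp only [if_pos h, ih]
      rw [if_pos (by simpa using h)]
    · simp only [if_neg h, ih]
      rw [if_neg (by simpa using h)]

lemma alt_characterization (arr : List (List Int)) (flg : Int) :
    count_clear_alt arr flg
      = ((pvGrid.filter (fun x => 3 ≤ (pvK arr x).card)).card : Int) := by
  have hr : PySem.List.pyRange 0 5 1 = [(0 : Int), 1, 2, 3, 4] := by decide
  rw [count_clear_alt, hr]
  have hinner := fun i : Int => inner_eq arr i [0, 1, 2, 3, 4]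
  simp only [hinner]
  rw [flatMap_filter]
  have hl : (([0, 1, 2, 3, 4] : List Int).flatMap fun i =>
      ([0, 1, 2, 3, 4] : List Int).map fun j => ((i, j) : Int × Int)) = pvCells := by decide
  rw [hl]
  have hnodup : pvCells.Nodup := by decide
  have hset : (pvCells.filter (fun x => decide (3 ≤ (pvComp arr x.1 x.2).length))).toFinset
      = pvGrid.filter (fun x => 3 ≤ (pvK arr x).card) := by
    ext x
    simp only [List.mem_toFinset, List.mem_filter, Finset.mem_filter, decide_eq_true_eq]
    constructor
    · rintro ⟨hx, hcond⟩
      have hxg : x ∈ pvGrid := List.mem_toFinset.2 hx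
      exact ⟨hxg, by rw [card_pvK hxg]; exact hcond⟩
    · rintro ⟨hxg, hcond⟩
      refine ⟨List.mem_toFinset.1 hxg, ?_⟩
      rw [← card_pvK hxg]
      exact hcond
  have hlen : (pvCells.filter (fun x => decide (3 ≤ (pvComp arr x.1 x.2).length))).length
      = (pvGrid.filter (fun x => 3 ≤ (pvK arr x).card)).card := by
    rw [← hset, List.toFinset_card_of_nodup (hnodup.filter _)]
  rw [hlen]

-- ===== final assembly =====
lemma count_clear_eq (arr : List (List Int)) (flg : Int) :
    count_clear arr flg = count_clear_alt arr flg := by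
  rw [count_clear_eq_foldl, alt_characterization]
  have hinit : OInv arr [] (arr, List.replicate 5 (List.replicate 5 (0 : Int)), 0) := by
    refine ⟨by simp, ?_, ?_, ?_⟩
    · simpa using vrepr_v0
    · intro p hp _; rfl
    · simp
  have hfin := foldl_invariant (pvOuterBody flg) (OInv arr) pvCells []
    (arr, List.replicate 5 (List.replicate 5 (0 : Int)), 0) hinit
    (fun p c s hc hi => pvOuter_step hc hi)
  rw [List.nil_append] at hfin
  obtain ⟨hP, hvr, hAg, hcnt⟩ := hfin
  rw [hcnt]
  have hVfull : pvCells.toFinset.biUnion (pvK arr) = pvGrid := by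
    apply Finset.Subset.antisymm
    · intro x hx
      obtain ⟨d, hd, hxd⟩ := Finset.mem_biUnion.1 hx
      exact pvK_sub_grid (hP d hd) hxd
    · intro x hx
      exact Finset.mem_biUnion.2 ⟨x, hx, self_mem_pvK x⟩
  rw [hVfull]

-- ===== VERDICT (by name: the statement is the Claim_ definition above) =====
theorem count_clear_spec : Claim_equal_count_clear := by
  intro arr flg _ _
  exact count_clear_eq arr flg
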